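-- pv_equiv track=rewrite | github.com/unix-follower/pubchem-cid4-analysis | cid4-fastapi/src/ml/datasets.py | infer_taxonomy_class
-- ===== SOURCE A (Python) =====
-- def infer_taxonomy_class(value: str) -> str:
--     lowered = value.lower()
--     bird_keywords = {
--         "chicken",
--         "emu",
--         "ostrich",
--         "duck",
--         "goose",
--         "guineafowl",
--         "pheasant",
--         "pigeon",
--         "quail",
--         "turkey",
--         "waterfowl",
--         "ptarmigan",
--         "gallus",
--         "dromaius",
--         "struthio",
--         "anas",
--         "anser",
--         "numida",
--         "phasian",
--         "columba",
--         "meleagris",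
--         "melanitta",
--         "lagopus",
--         "anatidae",
--         "columbidae",
--         "phasianidae",
--     }
--     mammal_keywords = {
--         "sheep",
--         "cattle",
--         "beefalo",
--         "hare",
--         "pig",
--         "rabbit",
--         "buffalo",
--         "elk",
--         "horse",
--         "goat",
--         "deer",
--         "bison",
--         "bos",
--         "ovis",
--         "sus",
--         "lepus",
--         "oryctolagus",
--         "leporidae",
--         "cervus",
--         "cervidae",
--         "equus",
--         "capra",
--         "bubalus",
--         "odocoileus",
--     }
--
--     if any(keyword in lowered for keyword in bird_keywords):
--         return "bird"
--     if any(keyword in lowered for keyword in mammal_keywords):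
--         return "mammal"
--     return "unknown"
-- ===== SOURCE B (Python) =====
-- BIRD_KEYWORDS = (
--     "chicken", "emu", "ostrich", "duck", "goose", "guineafowl", "pheasant",
--     "pigeon", "quail", "turkey", "waterfowl", "ptarmigan", "gallus",
--     "dromaius", "struthio", "anas", "anser", "numida", "phasian", "columba",
--     "meleagris", "melanitta", "lagopus", "anatidae", "columbidae",
--     "phasianidae",
-- )
-- MAMMAL_KEYWORDS = (
--     "sheep", "cattle", "beefalo", "hare", "pig", "rabbit", "buffalo", "elk",
--     "horse", "goat", "deer", "bison", "bos", "ovis", "sus", "lepus",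
--     "oryctolagus", "leporidae", "cervus", "cervidae", "equus", "capra",
--     "bubalus", "odocoileus",
-- )
--
--
-- def infer_taxonomy_class(value: str) -> str:
--     # One left-to-right pass over the suffixes of the lowered string,
--     # flagging both groups at once instead of one scan per keyword.
--     lowered = value.lower()
--     bird = False
--     mammal = False
--     tail = lowered
--     while tail:
--         if tail.startswith(BIRD_KEYWORDS):
--             bird = True
--         if tail.startswith(MAMMAL_KEYWORDS):
--             mammal = True
--         tail = tail[1:]
--     if bird:
--         return "bird"
--     if mammal:
--         return "mammal"
--     return "unknown"
-- ===== Notes on version B (the rewrite author's own statement) =====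
-- stated objective: alternative
-- what changed: Replaced A's per-keyword membership scans (one full substring search over the string per keyword) by a single left-to-right walk over the suffixes of the lowered string that flags both keyword groups at once via tuple-startswith, deciding the class from the two flags at the end.
import Mathlib
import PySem

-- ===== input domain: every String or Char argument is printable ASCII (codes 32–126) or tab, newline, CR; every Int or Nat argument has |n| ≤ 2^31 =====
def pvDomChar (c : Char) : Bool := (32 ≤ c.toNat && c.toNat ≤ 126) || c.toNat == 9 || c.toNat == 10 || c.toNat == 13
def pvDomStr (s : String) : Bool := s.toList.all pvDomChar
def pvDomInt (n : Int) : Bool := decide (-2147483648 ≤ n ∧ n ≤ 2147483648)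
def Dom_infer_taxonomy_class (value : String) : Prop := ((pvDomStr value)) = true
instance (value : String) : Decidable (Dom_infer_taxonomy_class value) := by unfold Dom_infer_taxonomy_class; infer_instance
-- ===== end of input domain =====

-- B replaces A's per-keyword substring scans by a single left-to-right pass over the
-- suffixes of the lowered string, flagging both keyword groups at once (objective: alternative).

-- ===== PORT A =====
-- A's keyword sets (Python sets; 'any' over them is order-independent, ported as lists in source order)
def birdKeywordsA : List String :=
  ["chicken", "emu", "ostrich", "duck", "goose", "guineafowl", "pheasant",
   "pigeon", "quail", "turkey", "waterfowl", "ptarmigan", "gallus",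
   "dromaius", "struthio", "anas", "anser", "numida", "phasian", "columba",
   "meleagris", "melanitta", "lagopus", "anatidae", "columbidae", "phasianidae"]

def mammalKeywordsA : List String :=
  ["sheep", "cattle", "beefalo", "hare", "pig", "rabbit", "buffalo", "elk",
   "horse", "goat", "deer", "bison", "bos", "ovis", "sus", "lepus",
   "oryctolagus", "leporidae", "cervus", "cervidae", "equus", "capra",
   "bubalus", "odocoileus"]

def infer_taxonomy_class (value : String) : String :=
  let lowered := PySem.Str.lower value
  if birdKeywordsA.any (fun k => PySem.Str.isIn k lowered) then "bird"
  else if mammalKeywordsA.any (fun k => PySem.Str.isIn k lowered) then "mammal"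
  else "unknown"

-- ===== PORT B =====
-- B's keyword tuples, as lists of char lists (Source B uses startswith on char positions)
def birdKeysB : List (List Char) :=
  ["chicken".toList, "emu".toList, "ostrich".toList, "duck".toList, "goose".toList,
   "guineafowl".toList, "pheasant".toList, "pigeon".toList, "quail".toList,
   "turkey".toList, "waterfowl".toList, "ptarmigan".toList, "gallus".toList,
   "dromaius".toList, "struthio".toList, "anas".toList, "anser".toList,
   "numida".toList, "phasian".toList, "columba".toList, "meleagris".toList,
   "melanitta".toList, "lagopus".toList, "anatidae".toList, "columbidae".toList,
   "phasianidae".toList]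

def mammalKeysB : List (List Char) :=
  ["sheep".toList, "cattle".toList, "beefalo".toList, "hare".toList, "pig".toList,
   "rabbit".toList, "buffalo".toList, "elk".toList, "horse".toList, "goat".toList,
   "deer".toList, "bison".toList, "bos".toList, "ovis".toList, "sus".toList,
   "lepus".toList, "oryctolagus".toList, "leporidae".toList, "cervus".toList,
   "cervidae".toList, "equus".toList, "capra".toList, "bubalus".toList,
   "odocoileus".toList]

-- the while-loop of Source B: walk the suffixes, updating the two flags
def altScan : List Char → Bool → Bool → Bool × Bool
  | [], bird, mammal => (bird, mammal)
  | c :: rest, bird, mammal =>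
      let bird' := if birdKeysB.any (fun k => PySem.Chars.startswith (c :: rest) k) then true else bird
      let mammal' := if mammalKeysB.any (fun k => PySem.Chars.startswith (c :: rest) k) then true else mammal
      altScan rest bird' mammal'

def infer_taxonomy_class_alt (value : String) : String :=
  let lowered := PySem.Chars.lower value.toList
  let r := altScan lowered false false
  if r.1 then "bird"
  else if r.2 then "mammal"
  else "unknown"

-- ===== PRECONDITION & SPEC =====
def Spec_infer_taxonomy_class (value : String) (out : String) : Prop := out = infer_taxonomy_class_alt value
instance (value : String) (out : String) : Decidable (Spec_infer_taxonomy_class value out) := by unfold Spec_infer_taxonomy_class; infer_instance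

-- ===== CLAIM (what is proved, stated in full; the proofs are below) =====
def Claim_equal_infer_taxonomy_class : Prop := ∀ (value : String), Dom_infer_taxonomy_class value → Spec_infer_taxonomy_class value (infer_taxonomy_class value)

-- ===== LEMMAS AND PROOFS =====

-- accumulator form of the scan: it ORs each flag with "some nonempty suffix matches"
lemma altScan_eq (s : List Char) (bird mammal : Bool) :
    altScan s bird mammal =
      (bird || s.tails.any (fun t => t ≠ [] && birdKeysB.any (fun k => PySem.Chars.startswith t k)),
       mammal || s.tails.any (fun t => t ≠ [] && mammalKeysB.any (fun k => PySem.Chars.startswith t k))) := by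
  induction s generalizing bird mammal with
  | nil => simp [altScan]
  | cons c rest ih =>
      simp only [altScan, ih, List.tails_cons, List.any_cons, Prod.mk.injEq]
      constructor <;> (split_ifs with h <;> simp [h])

-- "some keyword is a substring" = "some nonempty suffix starts with some keyword"
lemma any_isIn_eq_tails (keys : List (List Char)) (s : List Char)
    (hne : ∀ k ∈ keys, k ≠ []) :
    keys.any (fun k => PySem.Chars.isIn k s) =
      s.tails.any (fun t => t ≠ [] && keys.any (fun k => PySem.Chars.startswith t k)) := by
  rw [Bool.eq_iff_iff]
  simp only [List.any_eq_true, Bool.and_eq_true, decide_eq_true_eq,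
    ← PySem.Chars.exists_prefix_drop_iff_isIn, PySem.Chars.startswith_iff, List.mem_tails]
  constructor
  · rintro ⟨k, hk, j, hpre⟩
    exact ⟨s.drop j, ⟨List.drop_suffix j s,
      fun h0 => hne k hk (List.prefix_nil.mp (h0 ▸ hpre)), k, hk, hpre⟩⟩
  · rintro ⟨t, hsuf, -, k, hk, hpre⟩
    obtain ⟨u, rfl⟩ := hsuf
    exact ⟨k, hk, u.length, by simpa using hpre⟩

-- ===== VERDICT (by name: the statement is the Claim_ definition above) =====
theorem infer_taxonomy_class_spec : Claim_equal_infer_taxonomy_class := by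
  intro value _
  unfold Spec_infer_taxonomy_class infer_taxonomy_class infer_taxonomy_class_alt
  simp only [altScan_eq, Bool.false_or]
  have hb : birdKeywordsA.any (fun k => PySem.Str.isIn k (PySem.Str.lower value)) =
      (PySem.Chars.lower value.toList).tails.any
        (fun t => t ≠ [] && birdKeysB.any (fun k => PySem.Chars.startswith t k)) := by
    rw [← any_isIn_eq_tails birdKeysB _ (by decide)]
    simp only [PySem.Str.isIn_eq, PySem.Str.toList_lower]
    show birdKeywordsA.any _ = (birdKeywordsA.map String.toList).any _
    rw [List.any_map]; rfl
  have hm : mammalKeywordsA.any (fun k => PySem.Str.isIn k (PySem.Str.lower value)) =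
      (PySem.Chars.lower value.toList).tails.any
        (fun t => t ≠ [] && mammalKeysB.any (fun k => PySem.Chars.startswith t k)) := by
    rw [← any_isIn_eq_tails mammalKeysB _ (by decide)]
    simp only [PySem.Str.isIn_eq, PySem.Str.toList_lower]
    show mammalKeywordsA.any _ = (mammalKeywordsA.map String.toList).any _
    rw [List.any_map]; rfl
  rw [hb, hm]
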